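-- pv_equiv track=rewrite | github.com/Avo-k/scratch_gpt | basic_tokenizer.py | replace_key_with_pair
-- ===== SOURCE A (Python) =====
-- def replace_key_with_pair(seq, key, pair):
--     i = 0
--     while i < len(seq):
--         if seq[i] == key:
--             seq[i : i + 1] = pair
--             i += len(pair) - 1
--         i += 1
--     return seq
-- ===== SOURCE B (Python) =====
-- def replace_key_with_pair(seq, key, pair):
--     return [y for x in seq for y in (pair if x == key else [x])]
-- ===== Notes on version B (the rewrite author's own statement) =====
-- stated objective: simpler
-- what changed: Replaces the in-place while loop over a changing list with index-skipping and slice-splice assignments by a one-line flat comprehension that emits the pair for key elements and the element itself otherwise; A mutates seq in place, B builds a new list (return value is identical).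
import Mathlib
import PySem

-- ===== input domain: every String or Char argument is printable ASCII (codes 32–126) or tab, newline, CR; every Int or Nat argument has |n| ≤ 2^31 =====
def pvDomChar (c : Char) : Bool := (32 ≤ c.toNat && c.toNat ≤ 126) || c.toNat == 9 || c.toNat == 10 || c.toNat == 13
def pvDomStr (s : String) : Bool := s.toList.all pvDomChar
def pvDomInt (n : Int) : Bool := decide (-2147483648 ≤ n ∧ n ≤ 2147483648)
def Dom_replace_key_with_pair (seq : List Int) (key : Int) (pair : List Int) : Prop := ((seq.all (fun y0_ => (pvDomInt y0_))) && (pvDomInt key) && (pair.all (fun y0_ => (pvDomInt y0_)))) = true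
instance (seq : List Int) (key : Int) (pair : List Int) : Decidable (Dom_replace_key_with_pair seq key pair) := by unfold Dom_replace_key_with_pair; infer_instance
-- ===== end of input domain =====

-- B is a one-line flat comprehension instead of A's in-place while loop with
-- slice-splice assignments and index skipping; equivalence is about the return
-- value only (A mutates its argument, B does not).


-- ===== PORT A =====
-- The while loop: state is (seq, i); the guard i < len(seq) guarantees seq[i]
-- is in range, so `seq[i]?.getD 0` is exact. The slice assignment
-- `seq[i:i+1] = pair` is `take i ++ pair ++ drop (i+1)`; the subsequent
-- `i += len(pair) - 1; i += 1` nets to `i + pair.length` (exact also for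
-- empty pair, where Python's i-1+1 = i).
def replace_key_with_pair_loop (key : Int) (pair : List Int) (seq : List Int) (i : Nat) : List Int :=
  if i < seq.length then
    if seq[i]?.getD 0 = key then
      replace_key_with_pair_loop key pair (seq.take i ++ pair ++ seq.drop (i + 1)) (i + pair.length)
    else
      replace_key_with_pair_loop key pair seq (i + 1)
  else seq
termination_by seq.length - i
decreasing_by
  · simp only [List.length_append, List.length_take, List.length_drop]
    omega
  · omega

def replace_key_with_pair (seq : List Int) (key : Int) (pair : List Int) : List Int :=
  replace_key_with_pair_loop key pair seq 0

-- ===== PORT B =====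
def replace_key_with_pair_alt (seq : List Int) (key : Int) (pair : List Int) : List Int :=
  seq.flatMap (fun x => if x = key then pair else [x])

-- ===== PRECONDITION & SPEC =====
def Spec_replace_key_with_pair (seq : List Int) (key : Int) (pair : List Int) (out : List Int) : Prop := out = replace_key_with_pair_alt seq key pair
instance (seq : List Int) (key : Int) (pair : List Int) (out : List Int) : Decidable (Spec_replace_key_with_pair seq key pair out) := by unfold Spec_replace_key_with_pair; infer_instance

-- ===== CLAIM (what is proved, stated in full; the proofs are below) =====
def Claim_equal_replace_key_with_pair : Prop := ∀ (seq : List Int) (key : Int) (pair : List Int), Dom_replace_key_with_pair seq key pair → Spec_replace_key_with_pair seq key pair (replace_key_with_pair seq key pair)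

-- ===== LEMMAS AND PROOFS =====

-- Loop invariant: with `done` already processed (i = done.length), the loop
-- returns `done` followed by the flat-map of the remainder.
theorem replace_key_with_pair_loop_eq (key : Int) (pair : List Int) :
    ∀ (rest done : List Int),
      replace_key_with_pair_loop key pair (done ++ rest) done.length
        = done ++ rest.flatMap (fun x => if x = key then pair else [x]) := by
  intro rest
  induction rest with
  | nil =>
      intro done
      rw [replace_key_with_pair_loop]
      simp
  | cons x rs ih =>
      intro done
      rw [replace_key_with_pair_loop]
      have hlen : done.length < (done ++ x :: rs).length := by simp
      have hget : (done ++ x :: rs)[done.length]?.getD 0 = x := by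
        simp
      rw [if_pos hlen, hget]
      by_cases hx : x = key
      · rw [if_pos hx]
        have htake : (done ++ x :: rs).take done.length = done := by
          simp
        have hdrop : (done ++ x :: rs).drop (done.length + 1) = rs := by
          rw [show done.length + 1 = (done ++ [x]).length by simp,
              show done ++ x :: rs = (done ++ [x]) ++ rs by simp]
          simp
        rw [htake, hdrop]
        have := ih (done ++ pair)
        simp only [List.length_append] at this
        simpa [hx, List.append_assoc] using this
      · rw [if_neg hx]
        have := ih (done ++ [x])
        simp only [List.length_append, List.length_cons, List.length_nil] at this
        simpa [hx, List.append_assoc] using this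

-- ===== VERDICT (by name: the statement is the Claim_ definition above) =====
theorem replace_key_with_pair_spec : Claim_equal_replace_key_with_pair := by
  intro seq key pair _
  unfold Spec_replace_key_with_pair replace_key_with_pair replace_key_with_pair_alt
  simpa using replace_key_with_pair_loop_eq key pair seq []
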